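-- pv_equiv track=rewrite | github.com/gregoryann/Python-Beginner-Examples | +1500 Python Challenges/V Hard/A Watermelon 🍉.py | total_seeds
-- ===== SOURCE A (Python) =====
-- def total_seeds(watermelon):
-- 	h = len(watermelon)//2
-- 	sections = [
-- 		[sum([j for j in i[:h]]) for i in watermelon[:h]],
-- 		[sum([j for j in i[:h]]) for i in watermelon[h:]],
-- 		[sum([j for j in i[h:]]) for i in watermelon[:h]],
-- 		[sum([j for j in i[h:]]) for i in watermelon[h:]]
-- 	]
-- 	return sum([sum(s) for s in sections if sum(s) > 5])
-- ===== SOURCE B (Python) =====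
-- def prefix_sums(xs):
--     c = [0]
--     last = 0
--     for x in xs:
--         last += x
--         c.append(last)
--     return c
--
--
-- def total_seeds(watermelon):
--     n = len(watermelon)
--     h = n // 2
--     prefs = [prefix_sums(row) for row in watermelon]
--     lefts = [c[min(h, len(c) - 1)] for c in prefs]
--     totals = [c[len(c) - 1] for c in prefs]
--     cl = prefix_sums(lefts)
--     ct = prefix_sums(totals)
--     tl = cl[h]
--     bl = cl[n] - cl[h]
--     tr = ct[h] - cl[h]
--     br = (ct[n] - ct[h]) - bl
--     return sum(q for q in (tl, bl, tr, br) if q > 5)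
-- ===== Notes on version B (the rewrite author's own statement) =====
-- stated objective: alternative
-- what changed: B builds per-row prefix-sum tables and a row-direction prefix table over them (a summed-area-table approach), then reads each quadrant total off as a difference of two table entries instead of slicing the matrix into four sections and summing them.
import Mathlib
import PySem

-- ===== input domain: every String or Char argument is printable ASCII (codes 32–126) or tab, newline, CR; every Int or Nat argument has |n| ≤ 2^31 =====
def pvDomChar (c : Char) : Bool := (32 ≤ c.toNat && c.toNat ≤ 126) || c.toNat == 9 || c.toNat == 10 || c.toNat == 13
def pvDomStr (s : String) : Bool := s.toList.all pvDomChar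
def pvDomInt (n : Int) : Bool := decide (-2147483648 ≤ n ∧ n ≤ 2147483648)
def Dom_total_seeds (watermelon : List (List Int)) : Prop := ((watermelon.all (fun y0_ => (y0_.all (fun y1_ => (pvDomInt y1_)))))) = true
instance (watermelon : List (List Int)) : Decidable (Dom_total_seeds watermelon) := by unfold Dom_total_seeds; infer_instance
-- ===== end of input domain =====

-- B replaces A's four-way slicing by prefix-sum tables (a summed-area-table style
-- approach): each row is reduced to its prefix-sum list, a second prefix-sum pass runs
-- over the rows, and each quadrant total is a difference of two table entries;
-- objective: alternative.

-- ===== PORT A =====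
def total_seeds (watermelon : List (List Int)) : Int :=
  let h : Int := PySem.Int.floordiv (Int.ofNat watermelon.length) 2
  let sections : List (List Int) :=
    [ (PySem.List.slice watermelon none (some h)).map
        (fun i => ((PySem.List.slice i none (some h)).map (fun j => j)).sum),
      (PySem.List.slice watermelon (some h) none).map
        (fun i => ((PySem.List.slice i none (some h)).map (fun j => j)).sum),
      (PySem.List.slice watermelon none (some h)).map
        (fun i => ((PySem.List.slice i (some h) none).map (fun j => j)).sum),
      (PySem.List.slice watermelon (some h) none).map
        (fun i => ((PySem.List.slice i (some h) none).map (fun j => j)).sum) ]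
  ((sections.filter (fun s => s.sum > 5)).map (fun s => s.sum)).sum

-- ===== PORT B =====
-- 'prefix_sums' of Source B: c = [0]; last = 0; for x in xs: last += x; c.append(last)
def pvPrefLoop : List Int → List Int → Int → List Int
  | [], c, _ => c
  | x :: xs, c, last => pvPrefLoop xs (c ++ [last + x]) (last + x)

def pvPrefixSums (xs : List Int) : List Int := pvPrefLoop xs [0] 0

def total_seeds_alt (watermelon : List (List Int)) : Int :=
  let n : Int := Int.ofNat watermelon.length
  let h : Int := PySem.Int.floordiv n 2
  let prefs : List (List Int) := watermelon.map (fun row => pvPrefixSums row)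
  -- every index below is in range in Python (each c is nonempty; h ≤ n = cl/ct length - 1)
  let lefts : List Int := prefs.map (fun c => PySem.List.pyGetD c (min h ((Int.ofNat c.length) - 1)) 0)
  let totals : List Int := prefs.map (fun c => PySem.List.pyGetD c ((Int.ofNat c.length) - 1) 0)
  let cl := pvPrefixSums lefts
  let ct := pvPrefixSums totals
  let tl := PySem.List.pyGetD cl h 0
  let bl := PySem.List.pyGetD cl n 0 - PySem.List.pyGetD cl h 0
  let tr := PySem.List.pyGetD ct h 0 - PySem.List.pyGetD cl h 0
  let br := (PySem.List.pyGetD ct n 0 - PySem.List.pyGetD ct h 0) - bl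
  (([tl, bl, tr, br].filter (fun q => q > 5)).sum)

-- ===== PRECONDITION & SPEC =====
def Spec_total_seeds (watermelon : List (List Int)) (out : Int) : Prop := out = total_seeds_alt watermelon
instance (watermelon : List (List Int)) (out : Int) : Decidable (Spec_total_seeds watermelon out) := by unfold Spec_total_seeds; infer_instance

-- ===== CLAIM (what is proved, stated in full; the proofs are below) =====
def Claim_equal_total_seeds : Prop := ∀ (watermelon : List (List Int)), Dom_total_seeds watermelon → Spec_total_seeds watermelon (total_seeds watermelon)

-- ===== LEMMAS AND PROOFS =====

theorem pvPrefLoop_eq : ∀ (xs c : List Int) (last : Int),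
    pvPrefLoop xs c last = c ++ (List.range xs.length).map (fun k => last + (xs.take (k+1)).sum) := by
  intro xs
  induction xs with
  | nil => intro c last; simp [pvPrefLoop]
  | cons x rest ih =>
    intro c last
    simp [pvPrefLoop, ih, List.range_succ_eq_map, List.map_map, Function.comp_def]
    ring_nf
    exact fun a _ => trivial

theorem pvPrefixSums_eq (xs : List Int) :
    pvPrefixSums xs = (List.range (xs.length + 1)).map (fun k => (xs.take k).sum) := by
  rw [pvPrefixSums, pvPrefLoop_eq, List.range_succ_eq_map]
  simp [List.map_map, Function.comp_def]

theorem pvPrefixSums_length (xs : List Int) : (pvPrefixSums xs).length = xs.length + 1 := by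
  simp [pvPrefixSums_eq]

theorem pvPrefixSums_get (xs : List Int) (k : Nat) (hk : k ≤ xs.length) :
    PySem.List.pyGetD (pvPrefixSums xs) ((k : Nat) : Int) 0 = (xs.take k).sum := by
  rw [pvPrefixSums_eq, PySem.List.pyGetD_natCast]
  rw [List.getD_eq_getElem _ _ (by simpa using Nat.lt_succ_of_le hk)]
  simp

theorem pvSumMapSub (l : List (List Int)) (f g : List Int → Int) :
    (l.map f).sum - (l.map g).sum = (l.map (fun x => f x - g x)).sum := by
  induction l with
  | nil => simp
  | cons a t ih => simp [← ih]; ring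

theorem pvFilterSum (L : List (List Int)) :
    ((L.filter (fun s => s.sum > 5)).map (fun s => s.sum)).sum =
      ((L.map (fun s => s.sum)).filter (fun q => q > 5)).sum := by
  rw [List.filter_map]
  simp [Function.comp_def]


-- ===== VERDICT (by name: the statement is the Claim_ definition above) =====
theorem total_seeds_spec : Claim_equal_total_seeds := by
  intro w _
  unfold Spec_total_seeds total_seeds total_seeds_alt
  set L := w.length with hL
  set m : Nat := L / 2 with hm
  have hm' : m ≤ L := Nat.div_le_self _ _
  have hh : PySem.Int.floordiv (Int.ofNat L) 2 = ((m : Nat) : Int) := by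
    exact_mod_cast PySem.Int.floordiv_natCast L 2
  have hleft : ∀ r : List Int,
      PySem.List.pyGetD (pvPrefixSums r) (min ((m : Nat) : Int) ((Int.ofNat (pvPrefixSums r).length) - 1)) 0
        = (r.take m).sum := by
    intro r
    have h1 : (Int.ofNat (pvPrefixSums r).length) - 1 = ((r.length : Nat) : Int) := by
      simp [pvPrefixSums_length]
    have h2 : min ((m : Nat) : Int) ((r.length : Nat) : Int) = ((min m r.length : Nat) : Int) := by
      simp [Nat.cast_min]
    rw [h1, h2, pvPrefixSums_get _ _ (Nat.min_le_right _ _)]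
    congr 1
    rcases Nat.le_total m r.length with h | h
    · rw [Nat.min_eq_left h]
    · rw [Nat.min_eq_right h, List.take_of_length_le h, List.take_length]
  have htot : ∀ r : List Int,
      PySem.List.pyGetD (pvPrefixSums r) ((Int.ofNat (pvPrefixSums r).length) - 1) 0 = r.sum := by
    intro r
    have h1 : (Int.ofNat (pvPrefixSums r).length) - 1 = ((r.length : Nat) : Int) := by
      simp [pvPrefixSums_length]
    rw [h1, pvPrefixSums_get _ _ le_rfl, List.take_length]
  simp only [hh, List.map_map, Function.comp_def]
  rw [show (fun r : List Int => PySem.List.pyGetD (pvPrefixSums r) (min ((m : Nat) : Int) ((Int.ofNat (pvPrefixSums r).length) - 1)) 0) = (fun r => (r.take m).sum) from funext hleft]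
  rw [show (fun r : List Int => PySem.List.pyGetD (pvPrefixSums r) ((Int.ofNat (pvPrefixSums r).length) - 1) 0) = (fun r => r.sum) from funext htot]
  rw [pvFilterSum]
  simp only [Int.ofNat_eq_natCast]
  rw [pvPrefixSums_get _ m (by simpa using hm'),
      pvPrefixSums_get _ m (by simpa using hm'),
      pvPrefixSums_get _ L (by simp [hL]),
      pvPrefixSums_get _ L (by simp [hL]),
      List.take_of_length_le (i := L) (l := w.map (fun r => (List.take m r).sum)) (by simp [hL]),
      List.take_of_length_le (i := L) (l := w.map (fun r => r.sum)) (by simp [hL])]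
  simp only [PySem.List.slice_to_natCast, PySem.List.slice_from_natCast, List.map_id']
  have hsub : ∀ l : List (List Int),
      (l.map (fun r => r.sum)).sum - (l.map (fun r => (r.take m).sum)).sum
        = (l.map (fun r => (r.drop m).sum)).sum := by
    intro l
    rw [pvSumMapSub]
    congr 1
    apply List.map_congr_left
    intro r _
    have := List.sum_take_add_sum_drop r m
    linarith
  have hsplit' : ∀ f : List Int → Int,
      (List.map f (List.drop m w)).sum = (List.map f w).sum - (List.map f (List.take m w)).sum := by
    intro f
    have := List.sum_take_add_sum_drop (List.map f w) m
    rw [← List.map_take, ← List.map_drop] at this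
    linarith
  congr 2
  simp only [List.map_cons, List.map_nil, ← List.map_take, List.cons.injEq, and_true]
  and_intros <;>
    first
      | trivial
      | linarith [hsub (List.take m w), hsub (List.drop m w),
          hsplit' (fun i : List Int => (List.take m i).sum), hsplit' (fun s : List Int => s.sum)]
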